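-- pv_equiv track=rewrite | github.com/JoseVigil/bloom-development-extension | brain/core/profile/session1_launcher.py | _build_command_line
-- ===== SOURCE A (Python) =====
-- from typing import List
--
-- def _build_command_line(args: List[str]) -> str:
--     """
--     Construye la command line con escapado correcto para CommandLineToArgvW
--     (reglas de Raymond Chen: backslashes antes de comillas se doblan).
--     """
--     parts = []
--     for arg in args:
--         if not arg or any(c in arg for c in (' ', '\t', '\n', '"')):
--             # Necesita comillas
--             escaped = []
--             slashes = 0
--             for ch in arg:
--                 if ch == '\\':
--                     slashes += 1
--                 elif ch == '"':
--                     escaped.append('\\' * (slashes * 2) + '\\"')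
--                     slashes = 0
--                 else:
--                     escaped.append('\\' * slashes + ch)
--                     slashes = 0
--             escaped.append('\\' * (slashes * 2))
--             parts.append('"' + ''.join(escaped) + '"')
--         else:
--             parts.append(arg)
--     return ' '.join(parts)
-- ===== SOURCE B (Python) =====
-- from typing import List
--
-- NEED = (' ', '\t', '\n', '"')
--
-- def _quote(arg: str) -> str:
--     """Escape by splitting the arg into (backslash-run, next-char) segments:
--     each segment is emitted at once from the run length, no per-char state."""
--     segs = []
--     i, n = 0, len(arg)
--     while i < n:
--         j = i
--         while j < n and arg[j] == '\\':
--             j += 1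
--         run = j - i
--         if j == n:
--             segs.append('\\' * (2 * run))
--             i = j
--         elif arg[j] == '"':
--             segs.append('\\' * (2 * run + 1) + '"')
--             i = j + 1
--         else:
--             segs.append('\\' * run + arg[j])
--             i = j + 1
--     return '"' + ''.join(segs) + '"'
--
-- def _build_command_line(args: List[str]) -> str:
--     return ' '.join(
--         _quote(a) if (not a or any(ch in NEED for ch in a)) else a
--         for a in args)
-- ===== Notes on version B (the rewrite author's own statement) =====
-- stated objective: alternative
-- what changed: B replaces A's per-character scan carrying a pending-backslash counter by a segmentation of each argument into (backslash-run, next-char) segments, each emitted whole from its run length, and tests the need for quoting by a single scan of the argument instead of A's loop over the four special characters.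
import Mathlib
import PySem

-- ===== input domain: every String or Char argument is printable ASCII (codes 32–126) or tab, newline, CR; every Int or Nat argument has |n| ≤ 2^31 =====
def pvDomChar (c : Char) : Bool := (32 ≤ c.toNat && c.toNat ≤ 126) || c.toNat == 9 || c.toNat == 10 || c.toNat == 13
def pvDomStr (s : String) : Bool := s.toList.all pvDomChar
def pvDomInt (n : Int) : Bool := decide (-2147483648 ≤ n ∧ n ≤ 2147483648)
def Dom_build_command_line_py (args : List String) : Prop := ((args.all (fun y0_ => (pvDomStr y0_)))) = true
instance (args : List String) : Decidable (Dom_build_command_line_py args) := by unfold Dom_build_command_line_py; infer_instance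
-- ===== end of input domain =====

-- B replaces A's per-character scan with its pending-backslash counter by a segmentation
-- of each argument into (backslash-run, next-char) segments emitted whole; same cost,
-- different algorithmic decomposition (objective: alternative).

-- ===== PORT A =====
-- `not arg or any(c in arg for c in (' ', '\t', '\n', '"'))`: loops over the four needles.
def aNeeds (cs : List Char) : Bool :=
  cs.isEmpty || [' ', '\t', '\n', '"'].any (fun c => PySem.Chars.isIn [c] cs)

-- A's inner loop over `arg` with the pending-`slashes` counter; appended chunks are
-- emitted directly (the final `''.join(escaped)` concatenates them in the same order).
def aEsc : List Char → Nat → List Char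
  | [], slashes => List.replicate (2 * slashes) '\\'
  | ch :: t, slashes =>
    if ch = '\\' then aEsc t (slashes + 1)
    else if ch = '"' then List.replicate (2 * slashes) '\\' ++ ['\\', '"'] ++ aEsc t 0
    else List.replicate slashes '\\' ++ [ch] ++ aEsc t 0

def build_command_line_py (args : List String) : String :=
  let parts := args.foldl (fun parts arg =>
    let cs := arg.toList
    if aNeeds cs then parts ++ [['"'] ++ aEsc cs 0 ++ ['"']]
    else parts ++ [cs]) []
  String.ofList (PySem.Chars.join [' '] parts)

-- ===== PORT B =====
-- the inner `while arg[j] == '\\'` scan of Source B: length of the leading backslash run …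
def bRunLen : List Char → Nat
  | [] => 0
  | c :: t => if c = '\\' then bRunLen t + 1 else 0

-- … and the suffix that follows it (Source B's position j onwards).
def bRunRest : List Char → List Char
  | [] => []
  | c :: t => if c = '\\' then bRunRest t else c :: t

theorem bRunRest_length (cs : List Char) : (bRunRest cs).length ≤ cs.length := by
  induction cs with
  | nil => simp [bRunRest]
  | cons c t ih => simp only [bRunRest]; split_ifs <;> simp; omega

-- Source B's outer `while i < n` loop: one segment per iteration, emitted whole.
def bSegs (cs : List Char) : List Char :=
  match h : bRunRest cs with
  | [] => List.replicate (2 * bRunLen cs) '\\'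
  | c :: t =>
    (if c = '"' then List.replicate (2 * bRunLen cs + 1) '\\' ++ ['"']
     else List.replicate (bRunLen cs) '\\' ++ [c]) ++ bSegs t
termination_by cs.length
decreasing_by
  have hle := bRunRest_length cs
  rw [h] at hle; simp at hle; omega

-- `not a or any(ch in NEED for ch in a)`: scans the argument once.
def bPart (a : String) : List Char :=
  if a.toList.isEmpty || a.toList.any (fun ch => ch ∈ [' ', '\t', '\n', '"']) then
    '"' :: (bSegs a.toList ++ ['"'])
  else a.toList

def build_command_line_py_alt (args : List String) : String :=
  String.ofList (PySem.Chars.join [' '] (args.map bPart))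

-- ===== PRECONDITION & SPEC =====
def Spec_build_command_line_py (args : List String) (out : String) : Prop := out = build_command_line_py_alt args
instance (args : List String) (out : String) : Decidable (Spec_build_command_line_py args out) := by unfold Spec_build_command_line_py; infer_instance

-- ===== CLAIM (what is proved, stated in full; the proofs are below) =====
def Claim_equal_build_command_line_py : Prop := ∀ (args : List String), Dom_build_command_line_py args → Spec_build_command_line_py args (build_command_line_py args)

-- ===== LEMMAS AND PROOFS =====

theorem singleton_infix {c : Char} {l : List Char} : [c] <:+: l ↔ c ∈ l := by
  constructor
  · intro h; exact (List.IsInfix.sublist h).subset (by simp)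
  · intro h
    obtain ⟨s, t, rfl⟩ := List.append_of_mem h
    exact ⟨s, t, by simp⟩

theorem needs_eq (cs : List Char) :
    aNeeds cs = (cs.isEmpty || cs.any (fun ch => ch ∈ [' ', '\t', '\n', '"'])) := by
  rw [Bool.eq_iff_iff]
  simp only [aNeeds, Bool.or_eq_true, List.any_eq_true, PySem.Chars.isIn_iff_infix,
    singleton_infix, decide_eq_true_eq]
  tauto

-- bSegs with `k` extra pending backslashes already consumed to the left of `cs`
-- (mirrors A's `slashes` state at the first segment only).
def bSegsK (k : Nat) (cs : List Char) : List Char :=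
  match bRunRest cs with
  | [] => List.replicate (2 * (k + bRunLen cs)) '\\'
  | c :: t =>
    (if c = '"' then List.replicate (2 * (k + bRunLen cs) + 1) '\\' ++ ['"']
     else List.replicate (k + bRunLen cs) '\\' ++ [c]) ++ bSegs t

theorem bSegs_eq_K (cs : List Char) : bSegs cs = bSegsK 0 cs := by
  rw [bSegs.eq_def]
  cases h : bRunRest cs <;> simp only [bSegsK, h, Nat.zero_add]

theorem bSegsK_slash (k : Nat) (t : List Char) :
    bSegsK k ('\\' :: t) = bSegsK (k + 1) t := by
  have h1 : bRunRest ('\\' :: t) = bRunRest t := by simp [bRunRest]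
  have h2 : bRunLen ('\\' :: t) = bRunLen t + 1 := by simp [bRunLen]
  have harith : k + (bRunLen t + 1) = k + 1 + bRunLen t := by omega
  simp only [bSegsK, h1, h2]
  rw [harith]

theorem bSegsK_quote (k : Nat) (t : List Char) :
    bSegsK k ('"' :: t) = List.replicate (2 * k + 1) '\\' ++ ['"'] ++ bSegs t := by
  have h1 : bRunRest ('"' :: t) = '"' :: t := by simp [bRunRest]
  have h2 : bRunLen ('"' :: t) = 0 := by simp [bRunLen]
  simp only [bSegsK, h1, h2, Nat.add_zero, List.append_assoc]
  simp

theorem bSegsK_other (k : Nat) (c : Char) (t : List Char) (hns : c ≠ '\\') (hq : c ≠ '"') :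
    bSegsK k (c :: t) = List.replicate k '\\' ++ [c] ++ bSegs t := by
  have h1 : bRunRest (c :: t) = c :: t := by simp [bRunRest, hns]
  have h2 : bRunLen (c :: t) = 0 := by simp [bRunLen, hns]
  simp only [bSegsK, h1, h2, if_neg hq, Nat.add_zero, List.append_assoc]

theorem aEsc_eq_bSegsK (cs : List Char) : ∀ k, aEsc cs k = bSegsK k cs := by
  induction cs with
  | nil => intro k; simp [aEsc, bSegsK, bRunRest, bRunLen]
  | cons c t ih =>
    intro k
    rcases eq_or_ne c '\\' with rfl | hns
    · rw [bSegsK_slash, ← ih (k + 1)]; simp [aEsc]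
    · rcases eq_or_ne c '"' with rfl | hq
      · rw [bSegsK_quote]
        simp only [aEsc, if_neg (by decide : ('"' : Char) ≠ '\\')]
        rw [ih 0, ← bSegs_eq_K, List.replicate_succ']
        simp
      · rw [bSegsK_other k c t hns hq]
        simp only [aEsc, if_neg hns, if_neg hq]
        rw [ih 0, ← bSegs_eq_K]

theorem aEsc_eq_bSegs (cs : List Char) : aEsc cs 0 = bSegs cs := by
  rw [aEsc_eq_bSegsK, bSegs_eq_K]

theorem part_eq (a : String) :
    (if aNeeds a.toList then ['"'] ++ aEsc a.toList 0 ++ ['"'] else a.toList) = bPart a := by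
  rw [needs_eq, aEsc_eq_bSegs]
  unfold bPart
  split <;> simp_all

-- A's foldl-with-append accumulation equals the map of B's per-argument part.
theorem foldA_eq (args : List String) (acc : List (List Char)) :
    args.foldl (fun parts arg =>
      if aNeeds arg.toList then parts ++ [['"'] ++ aEsc arg.toList 0 ++ ['"']]
      else parts ++ [arg.toList]) acc = acc ++ args.map bPart := by
  induction args generalizing acc with
  | nil => simp
  | cons a t ih =>
    simp only [List.foldl_cons, List.map_cons, ih]
    rw [← part_eq a]
    split <;> simp

-- ===== VERDICT (by name: the statement is the Claim_ definition above) =====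
theorem build_command_line_py_spec : Claim_equal_build_command_line_py := by
  intro args _
  unfold Spec_build_command_line_py
  have h := foldA_eq args []
  simp only [List.nil_append] at h
  exact congrArg (fun l => String.ofList (PySem.Chars.join [' '] l)) h
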